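-- pv_equiv track=rewrite | github.com/qxia1991/Yale-Omega | scripts/PolishSourceRunInfoFromDatabases.py | GetManualFlagOfRun
-- ===== SOURCE A (Python) =====
-- def GetManualFlagOfRun(runNo):
--     """Specific flags of runs that are not explicitly stored anywhere else."""
--
--     flag = 'NONE'
--
--     # some runs that have been flagged bad manually
--     badRuns = []
--     # strange bump near Tl characteristic peak
--     badRuns.append(3856)
--     # known poor purity period, purity recovering shape
--     for r in range(5338,5360):
--         badRuns.append(r)
--     # strange values in Sean's purity file
--     badRuns.append(4136)
--     for r in range(4151,4158):
--         badRuns.append(r)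
--
--     # strange spectrum
--     badRuns.append(7490)
--
--     # some runs are known to belong to low field campaign
--     lowField = [3790,4101,4102,4104,4105,4106,4111,4112,4113,4116]
--
--     # little or no data
--     noData = [2761,3417,3418,3419,5014,5015,5016,5418,7248,7633,7640]
--
--     # offset after weekly fit
--     offsetFit = [5543,5546,5549,5589,5598,4206,4232,4341,5013]
--
--     if runNo in badRuns:
--         flag = 'BAD'
--
--     if runNo in lowField:
--         flag = 'LOW-FIELD'
--
--     if runNo in noData:
--         flag = 'LITTLE-OR-NO-DATA'
--
--     if runNo in offsetFit:
--         flag = 'OFFSET-AFTER-WEEKLY-FIT'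
--
--     return flag
-- ===== SOURCE B (Python) =====
-- def GetManualFlagOfRun(runNo):
--     """Specific flags of runs that are not explicitly stored anywhere else."""
--     # The four hand-maintained categories are pairwise disjoint, so they can be
--     # flattened once into a sorted table of disjoint closed intervals
--     # (lo, hi, flag); the answer is then found by binary search on lo.
--     intervals = [
--         (2761, 2761, 'LITTLE-OR-NO-DATA'),
--         (3417, 3419, 'LITTLE-OR-NO-DATA'),
--         (3790, 3790, 'LOW-FIELD'),
--         (3856, 3856, 'BAD'),
--         (4101, 4102, 'LOW-FIELD'),
--         (4104, 4106, 'LOW-FIELD'),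
--         (4111, 4113, 'LOW-FIELD'),
--         (4116, 4116, 'LOW-FIELD'),
--         (4136, 4136, 'BAD'),
--         (4151, 4157, 'BAD'),
--         (4206, 4206, 'OFFSET-AFTER-WEEKLY-FIT'),
--         (4232, 4232, 'OFFSET-AFTER-WEEKLY-FIT'),
--         (4341, 4341, 'OFFSET-AFTER-WEEKLY-FIT'),
--         (5013, 5013, 'OFFSET-AFTER-WEEKLY-FIT'),
--         (5014, 5016, 'LITTLE-OR-NO-DATA'),
--         (5338, 5359, 'BAD'),
--         (5418, 5418, 'LITTLE-OR-NO-DATA'),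
--         (5543, 5543, 'OFFSET-AFTER-WEEKLY-FIT'),
--         (5546, 5546, 'OFFSET-AFTER-WEEKLY-FIT'),
--         (5549, 5549, 'OFFSET-AFTER-WEEKLY-FIT'),
--         (5589, 5589, 'OFFSET-AFTER-WEEKLY-FIT'),
--         (5598, 5598, 'OFFSET-AFTER-WEEKLY-FIT'),
--         (7248, 7248, 'LITTLE-OR-NO-DATA'),
--         (7490, 7490, 'BAD'),
--         (7633, 7633, 'LITTLE-OR-NO-DATA'),
--         (7640, 7640, 'LITTLE-OR-NO-DATA'),
--     ]
--     # binary search: lo = number of intervals whose start is <= runNo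
--     lo, hi = 0, len(intervals)
--     while lo < hi:
--         mid = (lo + hi) // 2
--         if intervals[mid][0] <= runNo:
--             lo = mid + 1
--         else:
--             hi = mid
--     if lo > 0 and runNo <= intervals[lo - 1][1]:
--         return intervals[lo - 1][2]
--     return 'NONE'
-- ===== Notes on version B (the rewrite author's own statement) =====
-- stated objective: alternative
-- what changed: Flattens the four pairwise-disjoint category lists into one sorted table of disjoint closed intervals (coalescing the consecutive runs) and finds the flag with a hand-written binary search plus one interval check, instead of A's four sequential list-membership scans with flag reassignment.
import Mathlib
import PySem

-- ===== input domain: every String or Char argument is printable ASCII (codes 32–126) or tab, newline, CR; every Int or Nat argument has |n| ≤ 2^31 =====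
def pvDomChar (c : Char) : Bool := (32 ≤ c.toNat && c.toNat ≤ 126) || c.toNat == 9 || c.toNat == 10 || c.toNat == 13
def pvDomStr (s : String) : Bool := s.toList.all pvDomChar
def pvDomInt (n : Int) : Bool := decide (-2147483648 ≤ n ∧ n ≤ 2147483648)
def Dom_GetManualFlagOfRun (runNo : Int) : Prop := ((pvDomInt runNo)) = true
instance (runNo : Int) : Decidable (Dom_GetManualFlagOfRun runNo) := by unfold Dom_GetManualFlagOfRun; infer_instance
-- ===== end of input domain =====

-- B flattens the four pairwise-disjoint categories into one sorted table of
-- disjoint closed intervals and binary-searches it, instead of A's four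
-- sequential list-membership scans (objective: alternative).

-- ===== PORT A =====
def GetManualFlagOfRun (runNo : Int) : String :=
  let flag := "NONE"
  -- badRuns built by appends, the two Python for-loops as folds over pyRange
  let badRuns : List Int := [] ++ [3856]
  let badRuns := (PySem.List.pyRange 5338 5360 1).foldl (fun acc r => acc ++ [r]) badRuns
  let badRuns := badRuns ++ [4136]
  let badRuns := (PySem.List.pyRange 4151 4158 1).foldl (fun acc r => acc ++ [r]) badRuns
  let badRuns := badRuns ++ [7490]
  let lowField : List Int := [3790, 4101, 4102, 4104, 4105, 4106, 4111, 4112, 4113, 4116]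
  let noData : List Int := [2761, 3417, 3418, 3419, 5014, 5015, 5016, 5418, 7248, 7633, 7640]
  let offsetFit : List Int := [5543, 5546, 5549, 5589, 5598, 4206, 4232, 4341, 5013]
  let flag := if runNo ∈ badRuns then "BAD" else flag
  let flag := if runNo ∈ lowField then "LOW-FIELD" else flag
  let flag := if runNo ∈ noData then "LITTLE-OR-NO-DATA" else flag
  let flag := if runNo ∈ offsetFit then "OFFSET-AFTER-WEEKLY-FIT" else flag
  flag

-- ===== PORT B =====
-- Source B's sorted table of disjoint closed intervals (lo, hi, flag)
def pvIntervals : List (Int × Int × String) :=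
  [ (2761, 2761, "LITTLE-OR-NO-DATA"),
    (3417, 3419, "LITTLE-OR-NO-DATA"),
    (3790, 3790, "LOW-FIELD"),
    (3856, 3856, "BAD"),
    (4101, 4102, "LOW-FIELD"),
    (4104, 4106, "LOW-FIELD"),
    (4111, 4113, "LOW-FIELD"),
    (4116, 4116, "LOW-FIELD"),
    (4136, 4136, "BAD"),
    (4151, 4157, "BAD"),
    (4206, 4206, "OFFSET-AFTER-WEEKLY-FIT"),
    (4232, 4232, "OFFSET-AFTER-WEEKLY-FIT"),
    (4341, 4341, "OFFSET-AFTER-WEEKLY-FIT"),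
    (5013, 5013, "OFFSET-AFTER-WEEKLY-FIT"),
    (5014, 5016, "LITTLE-OR-NO-DATA"),
    (5338, 5359, "BAD"),
    (5418, 5418, "LITTLE-OR-NO-DATA"),
    (5543, 5543, "OFFSET-AFTER-WEEKLY-FIT"),
    (5546, 5546, "OFFSET-AFTER-WEEKLY-FIT"),
    (5549, 5549, "OFFSET-AFTER-WEEKLY-FIT"),
    (5589, 5589, "OFFSET-AFTER-WEEKLY-FIT"),
    (5598, 5598, "OFFSET-AFTER-WEEKLY-FIT"),
    (7248, 7248, "LITTLE-OR-NO-DATA"),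
    (7490, 7490, "BAD"),
    (7633, 7633, "LITTLE-OR-NO-DATA"),
    (7640, 7640, "LITTLE-OR-NO-DATA") ]

-- Source B's while-loop binary search; fuel bounds the iterations (the loop halves
-- hi - lo each step, so 32 exceeds the iteration count for a 26-entry table —
-- a totality guard only, not an algorithm switch).
-- intervals[mid][0] is always in range, so getD with a dummy default is exact.
def pvBisect (runNo : Int) : Nat → Nat → Nat → Nat
  | 0, lo, _ => lo
  | fuel + 1, lo, hi =>
    if lo < hi then
      let mid := (lo + hi) / 2
      if (pvIntervals.getD mid (0, 0, "")).1 ≤ runNo then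
        pvBisect runNo fuel (mid + 1) hi
      else
        pvBisect runNo fuel lo mid
    else lo

def GetManualFlagOfRun_alt (runNo : Int) : String :=
  let lo := pvBisect runNo 32 0 pvIntervals.length
  if lo > 0 ∧ runNo ≤ (pvIntervals.getD (lo - 1) (0, 0, "")).2.1 then
    (pvIntervals.getD (lo - 1) (0, 0, "")).2.2
  else "NONE"

-- ===== PRECONDITION & SPEC =====
def Spec_GetManualFlagOfRun (runNo : Int) (out : String) : Prop := out = GetManualFlagOfRun_alt runNo
instance (runNo : Int) (out : String) : Decidable (Spec_GetManualFlagOfRun runNo out) := by unfold Spec_GetManualFlagOfRun; infer_instance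

-- ===== CLAIM (what is proved, stated in full; the proofs are below) =====
def Claim_equal_GetManualFlagOfRun : Prop := ∀ (runNo : Int), Dom_GetManualFlagOfRun runNo → Spec_GetManualFlagOfRun runNo (GetManualFlagOfRun runNo)

-- ===== LEMMAS AND PROOFS =====

-- the start of interval i in the table
def pvStart (i : Nat) : Int := (pvIntervals.getD i (0, 0, "")).1

-- loop invariant of the binary search: the result r splits [lo, hi) into
-- starts ≤ runNo (below r) and starts > runNo (from r on)
theorem pv_bisect_inv (runNo : Int) (fuel lo hi : Nat) (hlh : lo ≤ hi) (hfuel : hi - lo ≤ fuel)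
    (hmono : ∀ i j, lo ≤ i → i ≤ j → j < hi → pvStart i ≤ pvStart j) :
    lo ≤ pvBisect runNo fuel lo hi ∧ pvBisect runNo fuel lo hi ≤ hi ∧
    (∀ i, lo ≤ i → i < pvBisect runNo fuel lo hi → pvStart i ≤ runNo) ∧
    (∀ i, pvBisect runNo fuel lo hi ≤ i → i < hi → runNo < pvStart i) := by
  induction fuel generalizing lo hi with
  | zero =>
    have : lo = hi := by omega
    subst this
    simp only [pvBisect]
    refine ⟨le_refl _, le_refl _, ?_, ?_⟩ <;> intro i h1 h2 <;> omega
  | succ fuel ih =>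
    by_cases h : lo < hi
    · simp only [pvBisect, h, if_true]
      set mid := (lo + hi) / 2 with hmid
      have hm1 : lo ≤ mid := by omega
      have hm2 : mid < hi := by omega
      by_cases hc : (pvIntervals.getD mid (0, 0, "")).1 ≤ runNo
      · simp only [hc, if_true]
        obtain ⟨a, b, c, d⟩ := ih (mid + 1) hi (by omega) (by omega)
          (fun i j hi1 hij hj => hmono i j (by omega) hij hj)
        refine ⟨by omega, b, ?_, d⟩
        intro i h1 h2
        by_cases hle : i ≤ mid
        · exact le_trans (hmono i mid h1 hle hm2) hc
        · exact c i (by omega) h2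
      · simp only [hc, if_false]
        obtain ⟨a, b, c, d⟩ := ih lo mid (by omega) (by omega)
          (fun i j hi1 hij hj => hmono i j hi1 hij (by omega))
        refine ⟨a, by omega, c, ?_⟩
        intro i h1 h2
        by_cases hlt : i < mid
        · exact d i h1 hlt
        · exact lt_of_lt_of_le (lt_of_not_ge hc) (hmono mid i hm1 (by omega) h2)
    · have : lo = hi := by omega
      subst this
      simp only [pvBisect, h, if_false]
      refine ⟨le_refl _, le_refl _, ?_, ?_⟩ <;> intro i h1 h2 <;> omega

-- A's four category lists, named
def pvCatBad : List Int :=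
  [3856] ++ PySem.List.pyRange 5338 5360 1 ++ [4136] ++ PySem.List.pyRange 4151 4158 1 ++ [7490]
def pvCatLow : List Int := [3790, 4101, 4102, 4104, 4105, 4106, 4111, 4112, 4113, 4116]
def pvCatNoData : List Int := [2761, 3417, 3418, 3419, 5014, 5015, 5016, 5418, 7248, 7633, 7640]
def pvCatOffset : List Int := [5543, 5546, 5549, 5589, 5598, 4206, 4232, 4341, 5013]

-- A's append-built badRuns list is pvCatBad
theorem pv_badRuns_eq :
    ((((PySem.List.pyRange 4151 4158 1).foldl (fun acc r => acc ++ [r])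
        (((PySem.List.pyRange 5338 5360 1).foldl (fun acc r => acc ++ [r])
          (([] : List Int) ++ [3856])) ++ [4136])) ++ [7490]) : List Int) = pvCatBad := by
  decide

-- A's let/if cascade, written out with the category lists named
theorem pv_a_cascade (runNo : Int) :
    GetManualFlagOfRun runNo =
      if runNo ∈ pvCatOffset then "OFFSET-AFTER-WEEKLY-FIT"
      else if runNo ∈ pvCatNoData then "LITTLE-OR-NO-DATA"
      else if runNo ∈ pvCatLow then "LOW-FIELD"
      else if runNo ∈ pvCatBad then "BAD"
      else "NONE" := by
  simp only [GetManualFlagOfRun, pv_badRuns_eq, pvCatLow, pvCatNoData, pvCatOffset]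
  rfl

-- pvCatBad with its ranges spelled out
theorem pvCatBad_eq : pvCatBad = ([3856, 5338, 5339, 5340, 5341, 5342, 5343, 5344, 5345, 5346, 5347, 5348, 5349, 5350, 5351, 5352, 5353, 5354, 5355, 5356, 5357, 5358, 5359, 4136, 4151, 4152, 4153, 4154, 4155, 4156, 4157, 7490] : List Int) := by decide

-- the table's interval starts are sorted
theorem pv_mono : ∀ j < 26, ∀ i < 26, i ≤ j → pvStart i ≤ pvStart j := by decide

set_option maxHeartbeats 4000000 in
theorem pv_main (runNo : Int) : GetManualFlagOfRun runNo = GetManualFlagOfRun_alt runNo := by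
  rw [pv_a_cascade]
  unfold GetManualFlagOfRun_alt
  obtain ⟨hr0, hr26, h1, h2⟩ := pv_bisect_inv runNo 32 0 26 (by omega) (by omega)
    (fun i j hi1 hij hj => pv_mono j hj i (by omega) hij)
  have hL : pvIntervals.length = 26 := by rfl
  rw [hL]
  set r := pvBisect runNo 32 0 26 with hr
  have hlow : r = 0 ∨ pvStart (r - 1) ≤ runNo := by
    rcases Nat.eq_zero_or_pos r with h | h
    · exact Or.inl h
    · exact Or.inr (h1 (r - 1) (by omega) (by omega))
  have hhigh : r = 26 ∨ runNo < pvStart r := by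
    rcases eq_or_lt_of_le hr26 with h | h
    · exact Or.inl h
    · exact Or.inr (h2 r (le_refl _) h)
  clear h1 h2 hr0 hr
  interval_cases r <;>
    simp only [pvStart, pvIntervals, List.getD, pvCatOffset, pvCatNoData, pvCatLow,
      pvCatBad_eq] at hlow hhigh ⊢ <;>
    norm_num at hlow hhigh ⊢ <;>
    split_ifs <;> first | rfl | omega

-- ===== VERDICT (by name: the statement is the Claim_ definition above) =====
theorem GetManualFlagOfRun_spec : Claim_equal_GetManualFlagOfRun := by
  intro runNo _
  unfold Spec_GetManualFlagOfRun
  exact pv_main runNo
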